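-- pv_equiv track=rewrite | github.com/levuphuc/lasotuvi | lasotuvi/AmDuong.py | timTuVi
-- ===== SOURCE A (Python) =====
-- def dichCung(cungBanDau, *args):
--     cungSauKhiDich = int(cungBanDau)
--     for soCungDich in args:
--         cungSauKhiDich += int(soCungDich)
--     if cungSauKhiDich % 12 is 0:
--         return 12
--     return cungSauKhiDich % 12
--
-- def timTuVi(cuc, ngaySinhAmLich):
--     """Tìm vị trí của sao Tử vi
--
--     Args:
--         cuc (TYPE): Description
--         ngaySinhAmLich (TYPE): Description
--
--     Returns:
--         TYPE: Description
--
--     Raises: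
--         Exception: Description
--     """
--     cungDan = 3  # Vị trí cung Dần ban đầu là 3
--     cucBanDau = cuc
--     if cuc not in [2, 3, 4, 5, 6]:  # Tránh trường hợp infinite loop
--         raise Exception("Số cục phải là 2, 3, 4, 5, 6")
--     while cuc < ngaySinhAmLich:
--         cuc += cucBanDau
--         cungDan += 1  # Dịch vị trí cung Dần
--     saiLech = cuc - ngaySinhAmLich
--     if saiLech % 2 is 1:
--         saiLech = -saiLech  # Nếu sai lệch là chẵn thì tiến, lẻ thì lùi
--     return dichCung(cungDan, saiLech)
-- ===== SOURCE B (Python) =====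
-- def timTuVi(cuc, ngaySinhAmLich):
--     """Closed-form position of the Tu Vi star: no loop, one ceiling division."""
--     if cuc not in (2, 3, 4, 5, 6):
--         raise Exception("Số cục phải là 2, 3, 4, 5, 6")
--     n = max(0, -(-(ngaySinhAmLich - cuc) // cuc))  # number of steps the while loop would take
--     saiLech = cuc * (1 + n) - ngaySinhAmLich
--     if saiLech % 2 == 1:
--         saiLech = -saiLech
--     return (3 + n + saiLech) % 12 or 12
-- ===== Notes on version B (the rewrite author's own statement) =====
-- stated objective: faster
-- what changed: Replaces the while loop that repeatedly adds cuc until it reaches ngaySinhAmLich with a closed-form ceiling division computing the step count directly, and inlines dichCung into one modular expression.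
import Mathlib
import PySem

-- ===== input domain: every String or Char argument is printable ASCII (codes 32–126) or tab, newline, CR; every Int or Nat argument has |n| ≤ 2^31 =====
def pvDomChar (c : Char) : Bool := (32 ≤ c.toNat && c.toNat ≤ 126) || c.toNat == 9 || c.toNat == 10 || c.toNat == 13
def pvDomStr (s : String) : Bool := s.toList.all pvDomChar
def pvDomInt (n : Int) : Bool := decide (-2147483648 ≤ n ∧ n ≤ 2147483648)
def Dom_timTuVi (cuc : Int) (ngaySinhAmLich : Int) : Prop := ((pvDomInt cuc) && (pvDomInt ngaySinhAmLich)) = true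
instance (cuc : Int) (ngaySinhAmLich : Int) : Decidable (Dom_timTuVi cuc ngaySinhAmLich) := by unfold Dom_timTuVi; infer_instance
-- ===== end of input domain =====

-- B replaces A's step-by-step while loop by a closed-form ceiling division (O(1) instead of
-- O(ngaySinhAmLich/cuc)); the guard where A raises is excluded by Pre_.

-- ===== PORT A =====
-- dichCung(cungBanDau, *args) with the single extra argument A passes
def dichCung (cungBanDau : Int) (args : List Int) : Int :=
  let cungSauKhiDich := args.foldl (· + ·) cungBanDau
  if PySem.Int.mod cungSauKhiDich 12 = 0 then 12
  else PySem.Int.mod cungSauKhiDich 12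

-- the while loop: state (cuc, cungDan); the '0 < cucBanDau' conjunct is a totality guard only
-- (Python's loop diverges for cucBanDau ≤ 0, but those inputs already raised before the loop)
def timTuViLoop (cucBanDau cuc cungDan ngaySinhAmLich : Int) : Int × Int :=
  if h : 0 < cucBanDau ∧ cuc < ngaySinhAmLich then
    timTuViLoop cucBanDau (cuc + cucBanDau) (cungDan + 1) ngaySinhAmLich
  else (cuc, cungDan)
termination_by (ngaySinhAmLich - cuc).toNat
decreasing_by omega

def timTuVi (cuc : Int) (ngaySinhAmLich : Int) : Int :=
  if cuc = 2 ∨ cuc = 3 ∨ cuc = 4 ∨ cuc = 5 ∨ cuc = 6 then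
    let p := timTuViLoop cuc cuc 3 ngaySinhAmLich
    let saiLech := p.1 - ngaySinhAmLich
    let saiLech := if PySem.Int.mod saiLech 2 = 1 then -saiLech else saiLech
    dichCung p.2 [saiLech]
  else 0  -- Python raises here; excluded by Pre_timTuVi

-- ===== PORT B =====
def timTuVi_alt (cuc : Int) (ngaySinhAmLich : Int) : Int :=
  if cuc = 2 ∨ cuc = 3 ∨ cuc = 4 ∨ cuc = 5 ∨ cuc = 6 then
    let n := max 0 (-(PySem.Int.floordiv (-(ngaySinhAmLich - cuc)) cuc))
    let saiLech := cuc * (1 + n) - ngaySinhAmLich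
    let saiLech := if PySem.Int.mod saiLech 2 = 1 then -saiLech else saiLech
    let r := PySem.Int.mod (3 + n + saiLech) 12
    if r = 0 then 12 else r
  else 0  -- Python raises here; excluded by Pre_timTuVi

-- ===== PRECONDITION & SPEC =====
-- Pre_ excludes exactly the inputs on which A (and B) raise: cuc outside {2,3,4,5,6}.
def Pre_timTuVi (cuc : Int) (ngaySinhAmLich : Int) : Prop :=
  cuc = 2 ∨ cuc = 3 ∨ cuc = 4 ∨ cuc = 5 ∨ cuc = 6
instance (cuc : Int) (ngaySinhAmLich : Int) : Decidable (Pre_timTuVi cuc ngaySinhAmLich) := by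
  unfold Pre_timTuVi; infer_instance
def pvWitness_timTuVi : Int × Int := (3, 17)

def Spec_timTuVi (cuc : Int) (ngaySinhAmLich : Int) (out : Int) : Prop := out = timTuVi_alt cuc ngaySinhAmLich
instance (cuc : Int) (ngaySinhAmLich : Int) (out : Int) : Decidable (Spec_timTuVi cuc ngaySinhAmLich out) := by unfold Spec_timTuVi; infer_instance

-- ===== CLAIM (what is proved, stated in full; the proofs are below) =====
def Claim_equal_timTuVi : Prop := ∀ (cuc : Int) (ngaySinhAmLich : Int), Dom_timTuVi cuc ngaySinhAmLich → Pre_timTuVi cuc ngaySinhAmLich → Spec_timTuVi cuc ngaySinhAmLich (timTuVi cuc ngaySinhAmLich)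

-- ===== LEMMAS AND PROOFS =====

-- closed form of the while loop, for positive step b
theorem timTuViLoop_eq (b : Int) (hb : 0 < b) :
    ∀ (c d ngay : Int),
      timTuViLoop b c d ngay =
        (c + b * max 0 (-(PySem.Int.floordiv (-(ngay - c)) b)),
         d + max 0 (-(PySem.Int.floordiv (-(ngay - c)) b))) := by
  intro c d ngay
  induction c, d using timTuViLoop.induct b (ngaySinhAmLich := ngay) with
  | case1 c d h ih =>
    rw [timTuViLoop, dif_pos h, ih]
    rw [PySem.Int.floordiv_eq_ediv_of_pos hb, PySem.Int.floordiv_eq_ediv_of_pos hb]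
    have step : (-(ngay - (c + b))) / b = (-(ngay - c)) / b + 1 := by
      have e : -(ngay - (c + b)) = -(ngay - c) + 1 * b := by ring
      rw [e, Int.add_mul_ediv_right _ _ (by omega : b ≠ 0)]
    have hneg : (-(ngay - c)) / b < 0 := by
      have := Int.ediv_nonneg (a := -(ngay - c)) (b := b)
      by_contra hc
      have h0 : 0 ≤ (-(ngay - c)) / b := by omega
      have hlt : -(ngay - c) < 0 := by omega
      have := Int.ediv_nonneg_iff_of_pos hb (a := -(ngay - c))
      omega
    rw [step]
    set q := (-(ngay - c)) / b with hq
    have h1 : max 0 (-(q + 1)) = -(q + 1) := by omega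
    have h2 : max 0 (-q) = -q := by omega
    rw [h1, h2]
    simp only [Prod.mk.injEq]
    constructor <;> ring
  | case2 c d h =>
    rw [timTuViLoop, dif_neg h]
    have hcge : ngay ≤ c := by omega
    rw [PySem.Int.floordiv_eq_ediv_of_pos hb]
    have hnn : 0 ≤ (-(ngay - c)) / b := Int.ediv_nonneg (by omega) (by omega)
    have hmax : max 0 (-((-(ngay - c)) / b)) = 0 := by omega
    rw [hmax]
    simp

-- ===== VERDICT (by name: the statement is the Claim_ definition above) =====
theorem timTuVi_spec : Claim_equal_timTuVi := by
  intro cuc ngay _ hpre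
  unfold Spec_timTuVi
  unfold Pre_timTuVi at hpre
  have hb : 0 < cuc := by rcases hpre with h|h|h|h|h <;> omega
  simp only [timTuVi, timTuVi_alt, dichCung, if_pos hpre, timTuViLoop_eq cuc hb, List.foldl]
  have key : cuc + cuc * max 0 (-(PySem.Int.floordiv (-(ngay - cuc)) cuc)) - ngay
      = cuc * (1 + max 0 (-(PySem.Int.floordiv (-(ngay - cuc)) cuc))) - ngay := by ring
  rw [key]
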